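-- pv_equiv track=rewrite | github.com/Zeeeepa/code-scalpel | src/code_scalpel/code_parsers/java_parsers/java_parsers_Maven.py | parse_build_output
-- ===== SOURCE A (Python) =====
-- from typing import Any, Dict, List, Optional
--
-- def parse_build_output(text: str) -> List[Dict[str, Any]]:
--     """Parse Maven build stdout/stderr into structured level+message records."""
--     results: List[Dict[str, Any]] = []
--     for line in text.splitlines():
--         line = line.strip()
--         if not line:
--             continue
--         for prefix, level in (
--             ("[ERROR]", "ERROR"),
--             ("[WARNING]", "WARNING"),
--             ("[INFO]", "INFO"),
--         ):
--             if line.startswith(prefix):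
--                 results.append(
--                     {"level": level, "message": line[len(prefix) :].strip()}
--                 )
--                 break
--     return results
-- ===== SOURCE B (Python) =====
-- from typing import Any, Dict, List
--
-- _LEVELS = {"ERROR", "WARNING", "INFO"}
--
-- def parse_build_output(text: str) -> List[Dict[str, Any]]:
--     """Parse Maven build stdout/stderr into structured level+message records.
--
--     Extract-then-classify: take the token between the leading '[' and the
--     first ']' and keep the line only if it is a known level.
--     """
--     results: List[Dict[str, Any]] = []
--     for raw in text.splitlines():
--         line = raw.strip()
--         if line.startswith("[") and "]" in line:
--             close = line.index("]")
--             token = line[1:close]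
--             if token in _LEVELS:
--                 results.append({"level": token, "message": line[close + 1:].strip()})
--     return results
-- ===== Notes on version B (the rewrite author's own statement) =====
-- stated objective: alternative
-- what changed: B extracts the token between the leading '[' and the first ']' and classifies it by set membership, instead of A's inner loop testing the three literal prefixes with a break.
import Mathlib
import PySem

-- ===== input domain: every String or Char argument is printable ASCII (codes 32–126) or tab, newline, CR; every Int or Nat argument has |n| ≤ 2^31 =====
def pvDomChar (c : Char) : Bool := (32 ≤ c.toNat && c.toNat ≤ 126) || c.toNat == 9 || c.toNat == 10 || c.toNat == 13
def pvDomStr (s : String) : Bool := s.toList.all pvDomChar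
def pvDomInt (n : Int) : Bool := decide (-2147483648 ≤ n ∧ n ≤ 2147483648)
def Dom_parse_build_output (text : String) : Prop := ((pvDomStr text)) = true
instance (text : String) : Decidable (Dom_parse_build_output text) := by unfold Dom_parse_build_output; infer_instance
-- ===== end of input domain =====

-- B extracts the token between the leading '[' and the first ']' and classifies it by
-- membership, instead of A's loop over the three literal prefixes (alternative decomposition).

-- ===== PORT A =====
-- inner 'for prefix, level in (…): if line.startswith(prefix): append; break'
def pvTryPrefixes (results : List (List (String × String))) (line : String) :
    List (String × String) → List (List (String × String))
  | [] => results
  | (p, lvl) :: rest =>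
    if PySem.Str.startswith line p then
      results ++ [[("level", lvl),
        ("message", PySem.Str.strip (PySem.Str.slice line (some (PySem.Str.len p : Int)) none))]]
    else pvTryPrefixes results line rest

def parse_build_output (text : String) : List (List (String × String)) :=
  (PySem.Str.splitlines text).foldl (fun results rawline =>
    let line := PySem.Str.strip rawline
    if line = "" then results
    else pvTryPrefixes results line [("[ERROR]", "ERROR"), ("[WARNING]", "WARNING"), ("[INFO]", "INFO")]) []

-- ===== PORT B =====
def parse_build_output_alt (text : String) : List (List (String × String)) :=
  (PySem.Str.splitlines text).foldl (fun results raw =>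
    let line := PySem.Str.strip raw
    if PySem.Str.startswith line "[" && PySem.Str.isIn "]" line then
      let close := PySem.Str.find line "]"
      let token := PySem.Str.slice line (some 1) (some close)
      if token ∈ ["ERROR", "WARNING", "INFO"] then
        results ++ [[("level", token),
          ("message", PySem.Str.strip (PySem.Str.slice line (some (close + 1)) none))]]
      else results
    else results) []

-- ===== PRECONDITION & SPEC =====
def Spec_parse_build_output (text : String) (out : List (List (String × String))) : Prop := out = parse_build_output_alt text
instance (text : String) (out : List (List (String × String))) : Decidable (Spec_parse_build_output text out) := by unfold Spec_parse_build_output; infer_instance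

-- ===== CLAIM (what is proved, stated in full; the proofs are below) =====
def Claim_equal_parse_build_output : Prop := ∀ (text : String), Dom_parse_build_output text → Spec_parse_build_output text (parse_build_output text)

-- ===== LEMMAS AND PROOFS =====


theorem pv_find_singleton_eq (pre suf : List Char) (c : Char) (hpre : c ∉ pre) :
    PySem.Chars.find (pre ++ c :: suf) [c] = (pre.length : Int) := by
  set s := pre ++ c :: suf with hs
  have hinf : [c] <:+: s := ⟨pre, suf, by simp [hs]⟩
  have h0 : 0 ≤ PySem.Chars.find s [c] := (PySem.Chars.find_nonneg_iff s [c]).2 hinf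
  obtain ⟨hp, hmin⟩ := PySem.Chars.find_spec (s := s) (sub := [c]) h0
  set f := (PySem.Chars.find s [c]).toNat with hfdef
  have hle : f ≤ pre.length := by
    by_contra hgt
    push Not at hgt
    exact hmin pre.length hgt (by rw [hs, List.drop_left]; exact ⟨suf, rfl⟩)
  have hge : ¬ f < pre.length := by
    intro hlt
    obtain ⟨t, ht⟩ := hp
    have hget : s[f]? = some c := by
      have := congrArg List.head? ht
      simpa [List.head?_drop] using this.symm
    have : pre[f]? = some c := by
      rw [hs] at hget
      rwa [List.getElem?_append_left (by omega)] at hget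
    exact hpre (List.mem_of_getElem? this)
  have : f = pre.length := by omega
  omega

theorem pv_find_decomp (s : List Char) (n : Nat)
    (hf : PySem.Chars.find s [']'] = (n : Int)) :
    n < s.length ∧ s = s.take n ++ ']' :: s.drop (n + 1) := by
  have h0 : 0 ≤ PySem.Chars.find s [']'] := by rw [hf]; positivity
  obtain ⟨hp, -⟩ := PySem.Chars.find_spec (s := s) (sub := [']']) h0
  rw [hf] at hp
  simp only [Int.toNat_natCast] at hp
  obtain ⟨t, ht⟩ := hp
  have hlen : n < s.length := by
    have := congrArg List.length ht
    simp [List.length_drop] at this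
    omega
  refine ⟨hlen, ?_⟩
  have hdropsucc : s.drop (n + 1) = t := by
    have h1 : (s.drop n).tail = t := by rw [← ht]; rfl
    rw [← h1, ← List.drop_drop, List.drop_one]
  rw [hdropsucc]
  conv_lhs => rw [← List.take_append_drop n s]
  rw [← ht]
  rfl

theorem pv_token_prefix (s tok : List Char) (n : Nat)
    (h1 : ['['] <+: s) (hf : PySem.Chars.find s [']'] = (n : Int))
    (htok : (s.drop 1).take (n - 1) = tok) : ('[' :: tok ++ [']']) <+: s := by
  obtain ⟨hlen, hdec⟩ := pv_find_decomp s n hf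
  obtain ⟨t, ht⟩ := h1
  simp only [List.singleton_append] at ht
  have hn1 : 1 ≤ n := by
    by_contra h
    have hn0 : n = 0 := by omega
    rw [hn0] at hdec
    simp at hdec
    rw [← ht] at hdec
    exact absurd (congrArg List.head? hdec) (by simp)
  have hdrop1 : s.drop 1 = t := by rw [← ht]; rfl
  have htlen : t.length = s.length - 1 := by rw [← ht]; simp
  have htoklen : tok.length = n - 1 := by
    rw [← htok, List.length_take, List.length_drop]
    omega
  have hteq : t = tok ++ s.drop n := by
    have h2 : t = t.take (n - 1) ++ t.drop (n - 1) := (List.take_append_drop _ _).symm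
    rw [hdrop1] at htok
    rw [htok] at h2
    have h3 : t.drop (n - 1) = s.drop n := by
      rw [← hdrop1, List.drop_drop]
      congr 1
      omega
    rw [h3] at h2
    exact h2
  have hdropn : s.drop n = ']' :: s.drop (n + 1) := by
    have hlt : (s.take n).length = n := by
      rw [List.length_take]
      omega
    calc s.drop n = ((s.take n) ++ ']' :: s.drop (n + 1)).drop ((s.take n).length) := by
            rw [← hdec, hlt]
      _ = ']' :: s.drop (n + 1) := List.drop_left
  refine ⟨s.drop (n + 1), ?_⟩
  conv_rhs => rw [← ht]
  have hfin : t = tok ++ ']' :: s.drop (n + 1) := by rw [hteq, hdropn]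
  rw [hfin]
  simp

theorem pv_pos_find (s : String) (tok r : List Char) (hr : s.toList = '[' :: tok ++ ']' :: r)
    (hno : ']' ∉ tok) : PySem.Str.find s "]" = ((tok.length + 1 : Nat) : Int) := by
  have h1 : s.toList = ('[' :: tok) ++ ']' :: r := by rw [hr]
  have h2 : ("]" : String).toList = [']'] := by decide
  unfold PySem.Str.find
  rw [h1, h2, pv_find_singleton_eq ('[' :: tok) r ']' (by simp [hno])]
  simp

theorem pv_pos_slice (s : String) (tok r : List Char) (hr : s.toList = '[' :: tok ++ ']' :: r) :
    PySem.Str.slice s (some 1) (some ((tok.length + 1 : Nat) : Int)) = String.ofList tok := by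
  unfold PySem.Str.slice
  congr 1
  rw [PySem.Chars.slice_eq_listSlice, hr]
  have h1 : (1 : Int) = ((1 : Nat) : Int) := by norm_num
  rw [h1, PySem.List.slice_natCast]
  simp

theorem pv_pos_sw (s : String) (tok r : List Char) (hr : s.toList = '[' :: tok ++ ']' :: r) :
    PySem.Str.startswith s "[" = true := by
  unfold PySem.Str.startswith
  rw [PySem.Chars.startswith_iff]
  have h2 : ("[" : String).toList = ['['] := by decide
  rw [h2, hr]
  exact ⟨tok ++ ']' :: r, rfl⟩

theorem pv_pos_isin (s : String) (tok r : List Char) (hr : s.toList = '[' :: tok ++ ']' :: r) :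
    PySem.Str.isIn "]" s = true := by
  unfold PySem.Str.isIn
  rw [PySem.Chars.isIn_iff_infix]
  have h2 : ("]" : String).toList = [']'] := by decide
  rw [h2, hr]
  exact ⟨'[' :: tok, r, by simp⟩


theorem pv_sw_false (s p : String) (h : ¬ p.toList <+: s.toList) :
    PySem.Str.startswith s p = false := by
  rw [Bool.eq_false_iff]
  intro hc
  exact h ((PySem.Chars.startswith_iff _ _).1 hc)


theorem pv_line_eq (results : List (List (String × String))) (s : String) :
    (if s = "" then results
     else pvTryPrefixes results s [("[ERROR]", "ERROR"), ("[WARNING]", "WARNING"), ("[INFO]", "INFO")])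
  = (if PySem.Str.startswith s "[" && PySem.Str.isIn "]" s then
      let close := PySem.Str.find s "]"
      let token := PySem.Str.slice s (some 1) (some close)
      if token ∈ ["ERROR", "WARNING", "INFO"] then
        results ++ [[("level", token),
          ("message", PySem.Str.strip (PySem.Str.slice s (some (close + 1)) none))]]
      else results
    else results) := by
  by_cases hE : ("[ERROR]" : String).toList <+: s.toList
  · -- line starts with "[ERROR]"
    have hswE : PySem.Str.startswith s "[ERROR]" = true := by
      unfold PySem.Str.startswith
      rw [PySem.Chars.startswith_iff]
      exact hE
    obtain ⟨r, hr0⟩ := hE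
    have hlit : ("[ERROR]" : String).toList = ['[', 'E', 'R', 'R', 'O', 'R', ']'] := by decide
    have hr : s.toList = '[' :: ['E', 'R', 'R', 'O', 'R'] ++ ']' :: r := by
      rw [← hr0, hlit]; rfl
    have hne : s ≠ "" := by intro h; rw [h] at hr; simp at hr
    have hg1 := pv_pos_sw s _ r hr
    have hg2 := pv_pos_isin s _ r hr
    have hclose : PySem.Str.find s "]" = (6 : Int) := by
      have := pv_pos_find s ['E', 'R', 'R', 'O', 'R'] r hr (by decide)
      simpa using this
    have htok : PySem.Str.slice s (some 1) (some (6 : Int)) = "ERROR" := by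
      have := pv_pos_slice s ['E', 'R', 'R', 'O', 'R'] r hr
      have h6 : (((['E', 'R', 'R', 'O', 'R'] : List Char).length + 1 : Nat) : Int) = (6 : Int) := by
        norm_num
      rw [h6] at this
      rw [this]
    have hlen : PySem.Str.len "[ERROR]" = (7 : Int) := by decide
    rw [if_neg hne]
    simp only [pvTryPrefixes, hswE, if_true, hg1, hg2, Bool.and_self, hclose, htok, hlen]
    norm_num
  · by_cases hW : ("[WARNING]" : String).toList <+: s.toList
    · -- line starts with "[WARNING]" (and not "[ERROR]")
      have hswE : PySem.Str.startswith s "[ERROR]" = false := pv_sw_false s _ hE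
      have hswW : PySem.Str.startswith s "[WARNING]" = true := by
        unfold PySem.Str.startswith
        rw [PySem.Chars.startswith_iff]
        exact hW
      obtain ⟨r, hr0⟩ := hW
      have hlit : ("[WARNING]" : String).toList
          = ['[', 'W', 'A', 'R', 'N', 'I', 'N', 'G', ']'] := by decide
      have hr : s.toList = '[' :: ['W', 'A', 'R', 'N', 'I', 'N', 'G'] ++ ']' :: r := by
        rw [← hr0, hlit]; rfl
      have hne : s ≠ "" := by intro h; rw [h] at hr; simp at hr
      have hg1 := pv_pos_sw s _ r hr
      have hg2 := pv_pos_isin s _ r hr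
      have hclose : PySem.Str.find s "]" = (8 : Int) := by
        have := pv_pos_find s ['W', 'A', 'R', 'N', 'I', 'N', 'G'] r hr (by decide)
        simpa using this
      have htok : PySem.Str.slice s (some 1) (some (8 : Int)) = "WARNING" := by
        have := pv_pos_slice s ['W', 'A', 'R', 'N', 'I', 'N', 'G'] r hr
        have h8 : (((['W', 'A', 'R', 'N', 'I', 'N', 'G'] : List Char).length + 1 : Nat) : Int)
            = (8 : Int) := by norm_num
        rw [h8] at this
        rw [this]
      have hlen : PySem.Str.len "[WARNING]" = (9 : Int) := by decide
      rw [if_neg hne]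
      simp only [pvTryPrefixes, hswE, hswW, if_true, Bool.false_eq_true, if_false,
        hg1, hg2, Bool.and_self, hclose, htok, hlen]
      norm_num
    · by_cases hI : ("[INFO]" : String).toList <+: s.toList
      · -- line starts with "[INFO]" (and neither of the others)
        have hswE : PySem.Str.startswith s "[ERROR]" = false := pv_sw_false s _ hE
        have hswW : PySem.Str.startswith s "[WARNING]" = false := pv_sw_false s _ hW
        have hswI : PySem.Str.startswith s "[INFO]" = true := by
          unfold PySem.Str.startswith
          rw [PySem.Chars.startswith_iff]
          exact hI
        obtain ⟨r, hr0⟩ := hI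
        have hlit : ("[INFO]" : String).toList = ['[', 'I', 'N', 'F', 'O', ']'] := by decide
        have hr : s.toList = '[' :: ['I', 'N', 'F', 'O'] ++ ']' :: r := by
          rw [← hr0, hlit]; rfl
        have hne : s ≠ "" := by intro h; rw [h] at hr; simp at hr
        have hg1 := pv_pos_sw s _ r hr
        have hg2 := pv_pos_isin s _ r hr
        have hclose : PySem.Str.find s "]" = (5 : Int) := by
          have := pv_pos_find s ['I', 'N', 'F', 'O'] r hr (by decide)
          simpa using this
        have htok : PySem.Str.slice s (some 1) (some (5 : Int)) = "INFO" := by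
          have := pv_pos_slice s ['I', 'N', 'F', 'O'] r hr
          have h5 : (((['I', 'N', 'F', 'O'] : List Char).length + 1 : Nat) : Int) = (5 : Int) := by
            norm_num
          rw [h5] at this
          rw [this]
        have hlen : PySem.Str.len "[INFO]" = (6 : Int) := by decide
        rw [if_neg hne]
        simp only [pvTryPrefixes, hswE, hswW, hswI, if_true, Bool.false_eq_true, if_false,
          hg1, hg2, Bool.and_self, hclose, htok, hlen]
        norm_num
      · -- no recognised prefix: both sides keep results unchanged
        have hA : (if s = "" then results
            else pvTryPrefixes results s
              [("[ERROR]", "ERROR"), ("[WARNING]", "WARNING"), ("[INFO]", "INFO")]) = results := by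
          by_cases hs0 : s = ""
          · rw [if_pos hs0]
          · rw [if_neg hs0]
            simp only [pvTryPrefixes, pv_sw_false s _ hE, pv_sw_false s _ hW, pv_sw_false s _ hI,
              Bool.false_eq_true, if_false]
        rw [hA]
        cases hgv : (PySem.Str.startswith s "[" && PySem.Str.isIn "]" s) with
        | false => simp
        | true =>
          rw [Bool.and_eq_true] at hgv
          obtain ⟨hg1, hg2⟩ := hgv
          have h1 : ['['] <+: s.toList := by
            have := (PySem.Chars.startswith_iff _ _).1 hg1
            have hb : ("[" : String).toList = ['['] := by decide
            rwa [hb] at this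
          have hbr : ("]" : String).toList = [']'] := by decide
          have hin : [']'] <:+: s.toList := by
            have := (PySem.Chars.isIn_iff_infix _ _).1 hg2
            rwa [hbr] at this
          have h0 : 0 ≤ PySem.Str.find s "]" := by
            unfold PySem.Str.find
            rw [hbr]
            exact (PySem.Chars.find_nonneg_iff _ _).2 hin
          have hf : PySem.Chars.find s.toList [']']
              = (((PySem.Str.find s "]").toNat : Nat) : Int) := by
            rw [Int.toNat_of_nonneg h0]
            unfold PySem.Str.find
            rw [hbr]
          have htokL : (PySem.Str.slice s (some 1) (some (PySem.Str.find s "]"))).toList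
              = (s.toList.drop 1).take ((PySem.Str.find s "]").toNat - 1) := by
            unfold PySem.Str.slice
            have hfind : PySem.Str.find s "]" = (((PySem.Str.find s "]").toNat : Nat) : Int) :=
              (Int.toNat_of_nonneg h0).symm
            rw [String.toList_ofList, PySem.Chars.slice_eq_listSlice, hfind]
            have h1i : (1 : Int) = ((1 : Nat) : Int) := by norm_num
            rw [h1i, PySem.List.slice_natCast]
            have h0' : 0 ≤ PySem.Chars.find s.toList [']'] := by
              rw [hf]; positivity
            simp [max_eq_left h0']
          have hnot : (PySem.Str.slice s (some 1) (some (PySem.Str.find s "]")))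
              ∉ (["ERROR", "WARNING", "INFO"] : List String) := by
            intro hmem
            simp only [List.mem_cons, List.not_mem_nil, or_false] at hmem
            rcases hmem with h | h | h
            · have := congrArg String.toList h
              rw [htokL] at this
              have hlitv : ("ERROR" : String).toList = ['E', 'R', 'R', 'O', 'R'] := by decide
              rw [hlitv] at this
              have hp := pv_token_prefix s.toList _ _ h1 hf this
              apply hE
              have hlit : ("[ERROR]" : String).toList = ['[', 'E', 'R', 'R', 'O', 'R', ']'] := by
                decide
              rw [hlit]
              exact hp
            · have := congrArg String.toList h
              rw [htokL] at this
              have hlitv : ("WARNING" : String).toList = ['W', 'A', 'R', 'N', 'I', 'N', 'G'] := by decide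
              rw [hlitv] at this
              have hp := pv_token_prefix s.toList _ _ h1 hf this
              apply hW
              have hlit : ("[WARNING]" : String).toList
                  = ['[', 'W', 'A', 'R', 'N', 'I', 'N', 'G', ']'] := by decide
              rw [hlit]
              exact hp
            · have := congrArg String.toList h
              rw [htokL] at this
              have hlitv : ("INFO" : String).toList = ['I', 'N', 'F', 'O'] := by decide
              rw [hlitv] at this
              have hp := pv_token_prefix s.toList _ _ h1 hf this
              apply hI
              have hlit : ("[INFO]" : String).toList = ['[', 'I', 'N', 'F', 'O', ']'] := by decide
              rw [hlit]
              exact hp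
          simp only [if_true]
          rw [if_neg hnot]

-- ===== VERDICT (by name: the statement is the Claim_ definition above) =====
theorem parse_build_output_spec : Claim_equal_parse_build_output := by
  intro text _
  unfold Spec_parse_build_output parse_build_output parse_build_output_alt
  have h : (fun (results : List (List (String × String))) (rawline : String) =>
      let line := PySem.Str.strip rawline
      if line = "" then results
      else pvTryPrefixes results line [("[ERROR]", "ERROR"), ("[WARNING]", "WARNING"), ("[INFO]", "INFO")])
    = (fun (results : List (List (String × String))) (raw : String) =>
      let line := PySem.Str.strip raw
      if PySem.Str.startswith line "[" && PySem.Str.isIn "]" line then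
        let close := PySem.Str.find line "]"
        let token := PySem.Str.slice line (some 1) (some close)
        if token ∈ ["ERROR", "WARNING", "INFO"] then
          results ++ [[("level", token),
            ("message", PySem.Str.strip (PySem.Str.slice line (some (close + 1)) none))]]
        else results
      else results) := by
    funext results raw
    exact pv_line_eq results (PySem.Str.strip raw)
  rw [h]
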